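-- pv_equiv track=rewrite | github.com/JimWolfie/Toby | Trice_Utility/generate_hashes.py | convert_deck_to_deck_str
-- ===== SOURCE A (Python) =====
-- from collections import defaultdict, namedtuple
--
-- Deck = namedtuple("Deck", "Maindeck Sideboard")
--
-- def convert_deck_to_deck_str(deck: Deck):
--     """Converts a Deck namedtuple into semicolon-delineated deck string."""
--     main, side = deck
--     deck_str = []
--
--     for card_name in main:
--         for _ in range(main[card_name]):
--             deck_str.append(card_name.lower().split("(")[0].strip())
--     for card_name in side:
--         for _ in range(side[card_name]):
--             deck_str.append("SB:" + card_name.lower().split("(")[0].strip())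
--
--     deck_str.sort()
--     return ";".join(deck_str)
-- ===== SOURCE B (Python) =====
-- def convert_deck_to_deck_str(deck):
--     """Converts a Deck namedtuple into semicolon-delineated deck string."""
--     main, side = deck
--     pairs = [(name.lower().split("(")[0].strip(), n) for name, n in main.items()]
--     pairs += [("SB:" + name.lower().split("(")[0].strip(), n) for name, n in side.items()]
--     pairs.sort(key=lambda p: p[0])
--     out = []
--     for tok, n in pairs:
--         out.extend([tok] * n)
--     return ";".join(out)
-- ===== Notes on version B (the rewrite author's own statement) =====
-- stated objective: alternative
-- what changed: Instead of expanding every card into its N copies and sorting the expanded N-element list, B normalizes each distinct entry once, sorts the U distinct (token,count) pairs by token, and expands them already in order; the Lean Pre_ only excludes assoc lists with duplicate keys, which cannot arise from a Python dict.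
import Mathlib
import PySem

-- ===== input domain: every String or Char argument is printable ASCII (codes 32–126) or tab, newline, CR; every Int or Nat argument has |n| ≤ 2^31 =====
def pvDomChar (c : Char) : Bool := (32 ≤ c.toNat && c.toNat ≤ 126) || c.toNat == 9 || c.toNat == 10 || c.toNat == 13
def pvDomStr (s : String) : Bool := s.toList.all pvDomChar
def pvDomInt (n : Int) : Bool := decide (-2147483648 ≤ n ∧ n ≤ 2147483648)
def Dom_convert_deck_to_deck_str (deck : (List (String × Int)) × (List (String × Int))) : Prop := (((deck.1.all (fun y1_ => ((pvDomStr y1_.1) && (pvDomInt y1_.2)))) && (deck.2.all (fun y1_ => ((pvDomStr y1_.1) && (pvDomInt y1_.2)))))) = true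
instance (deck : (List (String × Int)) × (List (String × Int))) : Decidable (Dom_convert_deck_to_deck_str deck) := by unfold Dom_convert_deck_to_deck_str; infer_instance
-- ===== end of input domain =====

-- B sorts the U distinct normalized (token, count) pairs and expands them in order,
-- instead of A's expand-then-sort over all N expanded card copies (alternative algorithm).

-- ===== PORT A =====
-- card_name.lower().split("(")[0].strip()
def pvNormA (s : String) : String :=
  PySem.Str.strip (((PySem.Str.split? (PySem.Str.lower s) "(").getD []).headD "")

-- The two dict loops: each key contributes range(count) copies (count looked up on the
-- entry itself; under Pre_'s distinct keys this is exactly main[card_name]).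
def convert_deck_to_deck_str (deck : (List (String × Int)) × (List (String × Int))) : String :=
  let main := deck.1
  let side := deck.2
  let deckStr : List String := []
  let deckStr := main.foldl (fun acc kv => acc ++ List.replicate kv.2.toNat (pvNormA kv.1)) deckStr
  let deckStr := side.foldl (fun acc kv => acc ++ List.replicate kv.2.toNat ("SB:" ++ pvNormA kv.1)) deckStr
  PySem.Str.join ";" (PySem.List.sorted deckStr (fun x => x) false)

-- ===== PORT B =====
def pvNormB (s : String) : String :=
  PySem.Str.strip (((PySem.Str.split? (PySem.Str.lower s) "(").getD []).headD "")

def convert_deck_to_deck_str_alt (deck : (List (String × Int)) × (List (String × Int))) : String :=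
  let main := deck.1
  let side := deck.2
  let pairs := main.map (fun kv => (pvNormB kv.1, kv.2))
  let pairs := pairs ++ side.map (fun kv => ("SB:" ++ pvNormB kv.1, kv.2))
  let pairs := PySem.List.sorted pairs (fun p => p.1) false
  let out := pairs.foldl (fun acc p => acc ++ List.replicate p.2.toNat p.1) []
  PySem.Str.join ";" out

-- ===== PRECONDITION & SPEC =====
-- Pre_ excludes assoc lists with a duplicated key inside either component: A's parameter is a
-- pair of Python dicts, which cannot hold two entries with the same key, so no input A runs on
-- is excluded — the condition only rules out representations that do not denote a dict.
def Pre_convert_deck_to_deck_str (deck : (List (String × Int)) × (List (String × Int))) : Prop :=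
  (deck.1.map Prod.fst).Nodup ∧ (deck.2.map Prod.fst).Nodup
instance (deck : (List (String × Int)) × (List (String × Int))) : Decidable (Pre_convert_deck_to_deck_str deck) := by unfold Pre_convert_deck_to_deck_str; infer_instance

def pvWitness_convert_deck_to_deck_str : ((List (String × Int)) × (List (String × Int))) :=
  ([("Foo (abc)", 2), ("Bar", 1)], [("Baz", 1)])

def Spec_convert_deck_to_deck_str (deck : (List (String × Int)) × (List (String × Int))) (out : String) : Prop := out = convert_deck_to_deck_str_alt deck
instance (deck : (List (String × Int)) × (List (String × Int))) (out : String) : Decidable (Spec_convert_deck_to_deck_str deck out) := by unfold Spec_convert_deck_to_deck_str; infer_instance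

-- ===== CLAIM (what is proved, stated in full; the proofs are below) =====
def Claim_equal_convert_deck_to_deck_str : Prop := ∀ (deck : (List (String × Int)) × (List (String × Int))), Dom_convert_deck_to_deck_str deck → Pre_convert_deck_to_deck_str deck → Spec_convert_deck_to_deck_str deck (convert_deck_to_deck_str deck)

-- ===== LEMMAS AND PROOFS =====

-- Expanding a key-sorted pair list yields a ≤-sorted token list.
theorem pv_expand_pairwise (l : List (String × Int)) (h : l.Pairwise (fun a b => a.1 ≤ b.1)) :
    (l.flatMap (fun p => List.replicate p.2.toNat p.1)).Pairwise (· ≤ ·) := by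
  induction l with
  | nil => simp
  | cons x t ih =>
    simp only [List.flatMap_cons, List.pairwise_append]
    refine ⟨List.pairwise_replicate.2 (Or.inr le_rfl), ih h.of_cons, ?_⟩
    intro a ha b hb
    rw [List.mem_replicate] at ha
    obtain ⟨q, hq, hbq⟩ := List.mem_flatMap.1 hb
    rw [List.mem_replicate] at hbq
    obtain ⟨-, rfl⟩ := ha
    obtain ⟨-, rfl⟩ := hbq
    exact (List.pairwise_cons.1 h).1 q hq

-- Sorting the expanded copies equals expanding the key-sorted pairs.
theorem pv_sorted_expand (E : List (String × Int)) :
    PySem.List.sorted (E.flatMap (fun p => List.replicate p.2.toNat p.1)) (fun x => x) false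
      = (PySem.List.sorted E (fun p => p.1) false).flatMap (fun p => List.replicate p.2.toNat p.1) := by
  apply PySem.List.sorted_id_eq_of_perm_of_pairwise
  · exact List.Perm.flatMap_right _ (PySem.List.sorted_perm E (fun p => p.1) false)
  · exact pv_expand_pairwise _ (PySem.List.sorted_pairwise E (fun p => p.1))

-- ===== VERDICT (by name: the statement is the Claim_ definition above) =====
theorem convert_deck_to_deck_str_spec : Claim_equal_convert_deck_to_deck_str := by
  intro deck _ _
  show convert_deck_to_deck_str deck = convert_deck_to_deck_str_alt deck
  unfold convert_deck_to_deck_str convert_deck_to_deck_str_alt pvNormA pvNormB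
  simp only [PySem.List.foldl_append_eq_flatMap, List.nil_append]
  have hm : ∀ (l : List (String × Int)) (f : String → String),
      l.flatMap (fun x => List.replicate x.2.toNat (f x.1))
        = (l.map (fun kv => (f kv.1, kv.2))).flatMap (fun p => List.replicate p.2.toNat p.1) := by
    intro l f; rw [List.flatMap_map]
  rw [hm deck.1 (fun s => PySem.Str.strip (((PySem.Str.split? (PySem.Str.lower s) "(").getD []).headD "")),
    hm deck.2 (fun s => "SB:" ++ PySem.Str.strip (((PySem.Str.split? (PySem.Str.lower s) "(").getD []).headD "")),
    ← List.flatMap_append, pv_sorted_expand]
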